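-- pv_equiv track=rewrite | github.com/griggz/griggz-prefect-collective | src/core/utils/strings.py | scrub_str_
-- ===== SOURCE A (Python) =====
-- def scrub_str_(v, replace, lowercase):
--     """
--     Removes unwanted string chars from value
--     Args:
--         value ([type]): [string]
--     Returns:
--         [type]: [clean string]
--     """
--     bad_chars = [
--         ";",
--         ":",
--         "!",
--         "*",
--         "/",
--         ",",
--         "'",
--         ".",
--         '"',
--         "|",
--         "(",
--         ")",
--         "+",
--         "\r",
--         "\n",
--     ]
--     value = ""
--     try:
--         value = str(v)
--         for i in bad_chars:
--             value = value.replace(i, "")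
--
--         if replace:
--             value = value.replace(" ", replace)
--
--         if lowercase:
--             value = value.lower()
--     except Exception:
--         value = ""
--
--     return value.strip()
-- ===== SOURCE B (Python) =====
-- def scrub_str_(v, replace, lowercase):
--     """Removes unwanted string chars from value (one pass over the characters)."""
--     bad = {";", ":", "!", "*", "/", ",", "'", ".", '"', "|", "(", ")", "+", "\r", "\n"}
--     value = ""
--     try:
--         value = "".join(c for c in str(v) if c not in bad)
--         if replace:
--             value = value.replace(" ", replace)
--         if lowercase:
--             value = value.lower()
--     except Exception:
--         value = ""
--     return value.strip()
-- ===== Notes on version B (the rewrite author's own statement) =====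
-- stated objective: simpler
-- what changed: A rescans the whole string 15 times (one .replace pass per bad character); B makes a single pass over the input characters filtering against a set of bad characters, then applies the same space-replace/lowercase/strip steps.
import Mathlib
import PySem

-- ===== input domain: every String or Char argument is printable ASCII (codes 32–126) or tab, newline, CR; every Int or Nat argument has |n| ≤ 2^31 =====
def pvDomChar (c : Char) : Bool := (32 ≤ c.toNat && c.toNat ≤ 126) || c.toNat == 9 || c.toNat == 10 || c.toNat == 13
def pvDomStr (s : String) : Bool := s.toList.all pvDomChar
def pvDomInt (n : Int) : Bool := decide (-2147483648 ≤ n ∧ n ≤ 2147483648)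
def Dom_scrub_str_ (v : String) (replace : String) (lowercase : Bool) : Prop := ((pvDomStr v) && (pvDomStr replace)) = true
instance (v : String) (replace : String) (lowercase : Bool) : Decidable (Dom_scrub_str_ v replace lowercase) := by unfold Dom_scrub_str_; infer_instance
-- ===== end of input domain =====

-- B replaces A's fifteen .replace passes by one filtering pass over the characters with a set
-- of bad characters; same space-replace / lowercase / strip steps afterwards.

-- ===== PORT A =====
-- the bad_chars list of A, in order
def pvBadChars : List String := [";", ":", "!", "*", "/", ",", "'", ".", "\"", "|", "(", ")", "+", "\r", "\n"]

-- str(v) = v for a string argument, so the try/except never fires; 'if replace:' is 'replace ≠ ""'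
def scrub_str_ (v : String) (replace : String) (lowercase : Bool) : String :=
  let value := pvBadChars.foldl (fun value i => PySem.Str.replace value i "") v
  let value := if replace = "" then value else PySem.Str.replace value " " replace
  let value := if lowercase then PySem.Str.lower value else value
  PySem.Str.strip value

-- ===== PORT B =====
-- the bad-character set of Source B
def pvBadList : List Char := [';', ':', '!', '*', '/', ',', '\'', '.', '"', '|', '(', ')', '+', '\r', '\n']
def pvBadSet : PySem.Set Char := PySem.Set.ofList pvBadList

def scrub_str__alt (v : String) (replace : String) (lowercase : Bool) : String :=
  let value := String.ofList (v.toList.filter (fun c => !(PySem.Set.contains pvBadSet c)))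
  let value := if replace = "" then value else PySem.Str.replace value " " replace
  let value := if lowercase then PySem.Str.lower value else value
  PySem.Str.strip value

-- ===== PRECONDITION & SPEC =====
def Spec_scrub_str_ (v : String) (replace : String) (lowercase : Bool) (out : String) : Prop := out = scrub_str__alt v replace lowercase
instance (v : String) (replace : String) (lowercase : Bool) (out : String) : Decidable (Spec_scrub_str_ v replace lowercase out) := by unfold Spec_scrub_str_; infer_instance

-- ===== CLAIM (what is proved, stated in full; the proofs are below) =====
def Claim_equal_scrub_str_ : Prop := ∀ (v : String) (replace : String) (lowercase : Bool), Dom_scrub_str_ v replace lowercase → Spec_scrub_str_ v replace lowercase (scrub_str_ v replace lowercase)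

-- ===== LEMMAS AND PROOFS =====

-- A's value.replace(c, "") for a single character c is a filter dropping c.
theorem go_filter (c : Char) : ∀ (fuel : Nat) (l acc : List Char), l.length ≤ fuel →
    PySem.Chars.replace.go [c] [] fuel l acc = acc.reverse ++ l.filter (fun x => !(x == c)) := by
  intro fuel
  induction fuel with
  | zero =>
    intro l acc h
    simp [PySem.Chars.replace.go, List.length_eq_zero_iff.mp (Nat.le_zero.mp h)]
  | succ n ih =>
    intro l acc h
    cases l with
    | nil => simp [PySem.Chars.replace.go]
    | cons c0 t =>
      simp only [PySem.Chars.replace.go, List.isPrefixOf, Bool.and_true]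
      by_cases hc : c == c0
      · simp only [hc, if_true, List.reverse_nil, List.nil_append]
        rw [show List.drop [c].length (c0 :: t) = t from rfl,
          ih t acc (by simpa using h)]
        simp [eq_of_beq hc]
      · simp only [hc]
        rw [if_neg (by simp [hc]), ih t (c0 :: acc) (by simpa using h)]
        simp [hc, Bool.beq_comm]
theorem repl_one (l : List Char) (c : Char) :
    PySem.Chars.replace l [c] [] = l.filter (fun x => !(x == c)) := by
  simpa [PySem.Chars.replace] using go_filter c l.length l [] le_rfl
theorem fold_filter : ∀ (cs : List Char) (l : List Char),
    List.foldl (fun v i => PySem.Str.replace v i "") (String.ofList l)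
      (cs.map (fun c => String.ofList [c]))
    = String.ofList (l.filter (fun x => !(cs.contains x))) := by
  intro cs
  induction cs with
  | nil => simp
  | cons c cs ih =>
    intro l
    simp only [List.map_cons, List.foldl_cons]
    rw [show PySem.Str.replace (String.ofList l) (String.ofList [c]) "" =
        String.ofList (l.filter (fun x => !(x == c))) by
      simp [PySem.Str.replace, repl_one]]
    rw [ih, List.filter_filter]
    congr 1
    apply List.filter_congr
    intro x _
    by_cases h : x = c <;> simp [h, Bool.and_comm]

theorem badChars_eq : pvBadChars = pvBadList.map (fun c => String.ofList [c]) := by decide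

-- ===== VERDICT (by name: the statement is the Claim_ definition above) =====
theorem scrub_str__spec : Claim_equal_scrub_str_ := by
  intro v replace lowercase _
  unfold Spec_scrub_str_
  simp only [scrub_str_, scrub_str__alt]
  have h1 : pvBadChars.foldl (fun value i => PySem.Str.replace value i "") v
      = String.ofList (v.toList.filter (fun c => !(PySem.Set.contains pvBadSet c))) := by
    conv_lhs => rw [badChars_eq, show v = String.ofList v.toList by simp]
    rw [fold_filter]
    congr 1
  rw [h1]
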